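-- pv_equiv track=rewrite | github.com/yangping4271/Subtitle-Translator | src/subtitle_translator/context_loader.py | strip_language_suffix
-- ===== SOURCE A (Python) =====
-- LANGUAGE_SUFFIXES = (
--     ".zh", ".zh-cn", ".zh-tw",
--     ".ja", ".ko", ".th", ".vi",
--     ".fr", ".de", ".es", ".pt", ".it", ".ru",
--     ".ar", ".en",
-- )
--
-- def strip_language_suffix(name: str) -> str:
--     """移除文件名中的语言后缀。"""
--     stripped = name
--     lowered = stripped.casefold()
--     for suffix in LANGUAGE_SUFFIXES:
--         if lowered.endswith(suffix):
--             stripped = stripped[:-len(suffix)]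
--             lowered = stripped.casefold()
--             break
--     return stripped
-- ===== SOURCE B (Python) =====
-- LANGUAGE_SUFFIXES = (
--     ".zh", ".zh-cn", ".zh-tw",
--     ".ja", ".ko", ".th", ".vi",
--     ".fr", ".de", ".es", ".pt", ".it", ".ru",
--     ".ar", ".en",
-- )
--
-- _SUFFIX_SET = frozenset(LANGUAGE_SUFFIXES)
--
-- def strip_language_suffix(name: str) -> str:
--     """移除文件名中的语言后缀。"""
--     idx = name.rfind('.')
--     if idx != -1 and name[idx:].casefold() in _SUFFIX_SET:
--         return name[:idx]
--     return name
-- ===== Notes on version B (the rewrite author's own statement) =====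
-- stated objective: simpler
-- what changed: B replaces A's linear scan over all 15 language suffixes with endswith tests by extracting the extension after the last dot (rfind) once and doing a single frozenset membership test on its casefolded form.
import Mathlib
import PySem

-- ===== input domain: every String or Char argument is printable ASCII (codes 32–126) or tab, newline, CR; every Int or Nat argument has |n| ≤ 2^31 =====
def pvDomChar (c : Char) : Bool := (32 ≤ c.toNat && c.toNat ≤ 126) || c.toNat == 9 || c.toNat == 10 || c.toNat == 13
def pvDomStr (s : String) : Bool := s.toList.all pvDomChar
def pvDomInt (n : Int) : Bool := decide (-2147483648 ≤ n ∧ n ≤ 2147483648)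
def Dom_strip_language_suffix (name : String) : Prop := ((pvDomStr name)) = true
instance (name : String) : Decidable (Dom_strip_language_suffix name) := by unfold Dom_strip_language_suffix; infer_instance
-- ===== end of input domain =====

-- B replaces A's scan over all 15 language suffixes by extracting the last-dot extension
-- (rfind) and one set-membership test; objective: simpler. (str.casefold is ported as
-- PySem.Str.lower, exact on the ASCII domain these theorems are about.)

-- ===== PORT A =====
def LANGUAGE_SUFFIXES : List String :=
  [".zh", ".zh-cn", ".zh-tw",
   ".ja", ".ko", ".th", ".vi",
   ".fr", ".de", ".es", ".pt", ".it", ".ru",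
   ".ar", ".en"]

-- the 'for suffix in LANGUAGE_SUFFIXES: … break' loop (the post-break recomputation of
-- 'lowered' is dead and not carried)
def stripLoop (stripped lowered : String) : List String → String
  | [] => stripped
  | suffix :: rest =>
    if PySem.Str.endswith lowered suffix then
      PySem.Str.slice stripped none (some (-(PySem.Str.len suffix)))   -- stripped[:-len(suffix)]
    else stripLoop stripped lowered rest

def strip_language_suffix (name : String) : String :=
  stripLoop name (PySem.Str.lower name) LANGUAGE_SUFFIXES

-- ===== PORT B =====
def strip_language_suffix_alt (name : String) : String :=
  let idx := PySem.Str.rfind name "."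
  if idx ≠ -1 ∧ (PySem.Set.ofList LANGUAGE_SUFFIXES).contains
        (PySem.Str.lower (PySem.Str.slice name (some idx) none)) = true then
    PySem.Str.slice name none (some idx)
  else
    name

-- ===== PRECONDITION & SPEC =====
def Spec_strip_language_suffix (name : String) (out : String) : Prop := out = strip_language_suffix_alt name
instance (name : String) (out : String) : Decidable (Spec_strip_language_suffix name out) := by unfold Spec_strip_language_suffix; infer_instance

-- ===== CLAIM (what is proved, stated in full; the proofs are below) =====
def Claim_equal_strip_language_suffix : Prop := ∀ (name : String), Dom_strip_language_suffix name → Spec_strip_language_suffix name (strip_language_suffix name)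

-- ===== LEMMAS AND PROOFS =====

theorem lowerChar_eq_dot {c : Char} : PySem.Chars.lowerChar c = '.' ↔ c = '.' := by
  unfold PySem.Chars.lowerChar PySem.Chars.isupper
  split_ifs with h
  · simp only [Bool.and_eq_true, decide_eq_true_eq, Char.le_def, UInt32.le_iff_toNat_le] at h
    have hA : 65 ≤ c.toNat := h.1
    have hZ : c.toNat ≤ 90 := h.2
    constructor
    · intro he
      exfalso
      have h1 : (c.toNat + 32).isValidChar := by
        constructor; omega
      have hv : (Char.ofNat (c.toNat + 32)).toNat = c.toNat + 32 := by
        rw [Char.toNat_ofNat, if_pos h1]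
      have h2 := congrArg Char.toNat he
      rw [hv] at h2
      have hd : ('.' : Char).toNat = 46 := by decide
      omega
    · intro he; subst he
      exfalso
      have hd : ('.' : Char).toNat = 46 := by decide
      omega
  · simp

theorem isPrefixOf_dot_drop (L : List Char) (i : Nat) :
    List.isPrefixOf ['.'] (L.drop i) = true ↔ L[i]? = some '.' := by
  rw [← List.head?_drop]
  cases L.drop i with
  | nil => simp [List.isPrefixOf]
  | cons a t =>
    simp only [List.isPrefixOf, Bool.and_true, List.head?_cons,
      Option.some.injEq, beq_iff_eq]
    exact eq_comm

theorem rfind_go_spec (L : List Char) (m : Nat) :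
    ∀ j : Nat, L[m]? = some '.' → m ≤ j →
    (∀ i, m < i → i ≤ j → L[i]? ≠ some '.') →
    PySem.Chars.rfind.go L ['.'] j = (m : Int) := by
  intro j
  induction j with
  | zero =>
    intro hm hmj _
    interval_cases m
    rw [PySem.Chars.rfind.go,
      if_pos (show List.isPrefixOf ['.'] L = true by
        have := (isPrefixOf_dot_drop L 0).mpr hm; simpa using this)]
    norm_num
  | succ j ih =>
    intro hm hmj hnone
    rw [PySem.Chars.rfind.go]
    by_cases hc : m = j + 1
    · subst hc
      rw [if_pos ((isPrefixOf_dot_drop L (j+1)).mpr hm)]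
    · have hmj' : m ≤ j := by omega
      rw [if_neg, ih hm hmj' (fun i h1 h2 => hnone i h1 (by omega))]
      intro hpre
      exact hnone (j+1) (by omega) (by omega) ((isPrefixOf_dot_drop L (j+1)).mp hpre)

theorem rfind_last_dot (L : List Char) (m : Nat) (hm : L[m]? = some '.')
    (hnone : ∀ i, m < i → L[i]? ≠ some '.') :
    PySem.Chars.rfind L ['.'] = (m : Int) := by
  have hlt : m < L.length := by
    by_contra h
    rw [List.getElem?_eq_none (by omega)] at hm
    simp at hm
  exact rfind_go_spec L m L.length hm (by omega) (fun i h1 _ => hnone i h1)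

theorem stripLoop_no_match (stripped lowered : String) (sufs : List String)
    (h : ∀ s ∈ sufs, PySem.Str.endswith lowered s = false) :
    stripLoop stripped lowered sufs = stripped := by
  induction sufs with
  | nil => rfl
  | cons a t ih =>
    rw [stripLoop, if_neg (by simp only [h a (by simp)]; simp)]
    exact ih (fun s hs => h s (by simp [hs]))

theorem stripLoop_match (stripped lowered : String) (sufs : List String) (suf : String)
    (hmem : suf ∈ sufs) (hs : PySem.Str.endswith lowered suf = true)
    (huniq : ∀ s ∈ sufs, PySem.Str.endswith lowered s = true → s = suf) :
    stripLoop stripped lowered sufs =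
      PySem.Str.slice stripped none (some (-(PySem.Str.len suf))) := by
  induction sufs with
  | nil => cases hmem
  | cons a t ih =>
    rw [stripLoop]
    by_cases ha : PySem.Str.endswith lowered a = true
    · rw [if_pos ha, huniq a (by simp) ha]
    · rw [if_neg ha]
      have hne : a ≠ suf := fun he => ha (he ▸ hs)
      exact ih (by rcases List.mem_cons.mp hmem with h|h; exacts [absurd h.symm hne, h])
        (fun s hst => huniq s (by simp [hst]))

theorem suffixes_no_suffix :
    ∀ s₁ ∈ LANGUAGE_SUFFIXES, ∀ s₂ ∈ LANGUAGE_SUFFIXES,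
      s₁.toList <:+ s₂.toList → s₁ = s₂ := by
  decide

theorem suffixes_dot :
    ∀ s ∈ LANGUAGE_SUFFIXES,
      s.toList.head? = some '.' ∧ '.' ∉ s.toList.tail ∧ 0 < s.toList.length := by
  decide

theorem lower_toList (s : String) : (PySem.Str.lower s).toList = s.toList.map PySem.Chars.lowerChar := by
  rw [PySem.Str.toList_lower]; rfl

-- ===== VERDICT (by name: the statement is the Claim_ definition above) =====
theorem strip_language_suffix_spec : Claim_equal_strip_language_suffix := by
  intro name _
  unfold Spec_strip_language_suffix
  unfold strip_language_suffix strip_language_suffix_alt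
  by_cases hex : ∃ suf ∈ LANGUAGE_SUFFIXES, PySem.Str.endswith (PySem.Str.lower name) suf = true
  · obtain ⟨suf, hmem, hs⟩ := hex
    obtain ⟨hdot, hnod, hlen⟩ := suffixes_dot suf hmem
    have hsuffix : suf.toList <:+ name.toList.map PySem.Chars.lowerChar := by
      rw [PySem.Str.endswith_eq, PySem.Chars.endswith_iff, lower_toList] at hs
      exact hs
    obtain ⟨M, hM⟩ := hsuffix
    set l := name.toList with hl
    set k := suf.toList.length with hk
    set n := l.length with hn
    have hMlen : M.length + k = n := by
      have := congrArg List.length hM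
      simpa using this
    have hkn : k ≤ n := by omega
    have hMl : M.length = n - k := by omega
    -- position of the last dot
    have hdotpos : l[n - k]? = some '.' := by
      have h0 : (l.map PySem.Chars.lowerChar)[n - k]? = some '.' := by
        rw [← hM, List.getElem?_append_right (by omega)]
        rw [show n - k - M.length = 0 by omega, ← List.head?_eq_getElem?]
        exact hdot
      rw [List.getElem?_map] at h0
      cases hc : l[n - k]? with
      | none => rw [hc] at h0; simp at h0
      | some c =>
        rw [hc] at h0
        simp only [Option.map_some, Option.some.injEq] at h0
        exact congrArg some (lowerChar_eq_dot.mp h0)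
    have hnodot : ∀ i, n - k < i → l[i]? ≠ some '.' := by
      intro i hi hcon
      have hiln : i < n := by
        by_contra hge
        rw [List.getElem?_eq_none (by omega)] at hcon
        simp at hcon
      have h1 : (l.map PySem.Chars.lowerChar)[i]? = some '.' := by
        rw [List.getElem?_map, hcon]
        simp [lowerChar_eq_dot.mpr rfl]
      rw [← hM, List.getElem?_append_right (by omega)] at h1
      have h2 : suf.toList.tail[i - M.length - 1]? = some '.' := by
        rw [List.getElem?_tail, show i - M.length - 1 + 1 = i - M.length by omega]
        exact h1
      exact hnod (List.mem_of_getElem? h2)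
    have hrfind : PySem.Str.rfind name "." = ((n - k : Nat) : Int) := by
      rw [PySem.Str.rfind_eq]
      exact rfind_last_dot l (n - k) hdotpos hnodot
    -- the extracted extension is suf
    have hext : PySem.Str.lower (PySem.Str.slice name (some ((n - k : Nat) : Int)) none) = suf := by
      apply String.toList_inj.mp
      rw [lower_toList, PySem.Str.toList_slice, PySem.Chars.slice_eq_listSlice,
        PySem.List.slice_from_natCast, List.map_drop, ← hM,
        show n - k = M.length from hMl.symm, List.drop_left]
    have huniq : ∀ s ∈ LANGUAGE_SUFFIXES, PySem.Str.endswith (PySem.Str.lower name) s = true → s = suf := by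
      intro s hsm hse
      rw [PySem.Str.endswith_eq, PySem.Chars.endswith_iff, lower_toList] at hse
      have hsuf2 : suf.toList <:+ l.map PySem.Chars.lowerChar := ⟨M, hM⟩
      rcases List.suffix_or_suffix_of_suffix hse hsuf2 with h | h
      · exact suffixes_no_suffix s hsm suf hmem h
      · exact (suffixes_no_suffix suf hmem s hsm h).symm
    rw [stripLoop_match name (PySem.Str.lower name) LANGUAGE_SUFFIXES suf hmem hs huniq]
    rw [hrfind]
    rw [if_pos]
    · apply String.toList_inj.mp
      rw [PySem.Str.toList_slice, PySem.Str.toList_slice, PySem.Chars.slice_eq_listSlice,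
        PySem.Chars.slice_eq_listSlice, PySem.List.slice_to_natCast]
      have hlen' : PySem.Str.len suf = (k : Int) := by
        simp [PySem.Str.len, hk]
      rw [hlen', PySem.List.slice_to_neg_natCast l k hlen]
    · constructor
      · intro hcon; omega
      · rw [hext]
        have hm2 : suf ∈ PySem.Set.ofList LANGUAGE_SUFFIXES :=
          (PySem.Set.mem_ofList LANGUAGE_SUFFIXES suf).mpr hmem
        simpa [PySem.Set.contains] using hm2
  · push_neg at hex
    rw [stripLoop_no_match name (PySem.Str.lower name) LANGUAGE_SUFFIXES
      (fun s hs => by simpa using hex s hs)]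
    rw [if_neg]
    rintro ⟨hidx, hcont⟩
    set idx := PySem.Str.rfind name "." with hidx'
    have hmem : PySem.Str.lower (PySem.Str.slice name (some idx) none) ∈ LANGUAGE_SUFFIXES := by
      rw [← PySem.Set.mem_ofList]
      simpa [PySem.Set.contains] using hcont
    have hend : PySem.Str.endswith (PySem.Str.lower name)
        (PySem.Str.lower (PySem.Str.slice name (some idx) none)) = true := by
      rw [PySem.Str.endswith_eq, PySem.Chars.endswith_iff, lower_toList, lower_toList,
        PySem.Str.toList_slice, PySem.Chars.slice_eq_listSlice, PySem.List.slice_some_none,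
        List.map_drop]
      exact List.drop_suffix _ _
    exact absurd hend (by simpa using hex _ hmem)
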